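-- pv_equiv track=rewrite | github.com/xinydev/telemetry-solution | tools/topdown_tool/topdown_tool/common/__init__.py | range_encode
-- ===== SOURCE A (Python) =====
-- from typing import List, Optional, Set, Sequence, TypeVar
--
-- def range_encode(nums: Sequence[int]) -> Optional[str]:
--     if not nums:
--         return None
--
--     # Ensure the list is sorted
--     nums = sorted(nums)
--     ranges = []
--     start = nums[0]
--     end = nums[0]
--
--     for n in nums[1:]:
--         if n == end + 1:
--             end = n
--         else:
--             if start == end:
--                 ranges.append(str(start))
--             else:
--                 ranges.append(f"{start}-{end}")
--             start = n
--             end = n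
--
--     # Add the last group
--     if start == end:
--         ranges.append(str(start))
--     else:
--         ranges.append(f"{start}-{end}")
--     return ",".join(ranges)
-- ===== SOURCE B (Python) =====
-- # Alternative: partition the enumerated sorted list into maximal runs of constant
-- # key v - i (value minus index); each run is a maximal block of consecutive ints.
-- def _groups(pairs):
--     out = []
--     i = 0
--     n = len(pairs)
--     while i < n:
--         k = pairs[i][1] - pairs[i][0]
--         j = i + 1
--         while j < n and pairs[j][1] - pairs[j][0] == k:
--             j += 1
--         out.append(pairs[i:j])
--         i = j
--     return out
--
--
-- def range_encode(nums):
--     if not nums: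
--         return None
--     parts = []
--     for g in _groups(list(enumerate(sorted(nums)))):
--         v = [x for _, x in g]
--         parts.append(str(v[0]) if len(v) == 1 else f"{v[0]}-{v[-1]}")
--     return ",".join(parts)
-- ===== Notes on version B (the rewrite author's own statement) =====
-- stated objective: alternative
-- what changed: Replaces the stateful start/end scan with a key-based partition: the sorted list is enumerated and split into maximal runs of constant value-minus-index key, and each run is formatted as one token.
import Mathlib
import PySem

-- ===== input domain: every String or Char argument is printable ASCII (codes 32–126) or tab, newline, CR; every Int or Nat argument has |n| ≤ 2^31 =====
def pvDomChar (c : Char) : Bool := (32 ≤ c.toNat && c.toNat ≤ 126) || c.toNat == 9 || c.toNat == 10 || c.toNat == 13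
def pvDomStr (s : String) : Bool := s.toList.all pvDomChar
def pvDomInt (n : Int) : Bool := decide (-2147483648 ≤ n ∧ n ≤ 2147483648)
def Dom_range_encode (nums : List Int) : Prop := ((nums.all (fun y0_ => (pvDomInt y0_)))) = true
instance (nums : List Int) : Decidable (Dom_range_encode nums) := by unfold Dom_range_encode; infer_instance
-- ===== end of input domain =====

-- B replaces A's stateful start/end scan by a partition of the enumerated sorted list
-- into maximal runs of constant value-minus-index key (objective: alternative).

-- ===== PORT A =====
-- str(start) / f"{start}-{end}" (the if-block A writes twice)
def pvFmtA (s e : Int) : String :=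
  if s = e then PySem.Int.toStr s else PySem.Int.toStr s ++ "-" ++ PySem.Int.toStr e

-- the 'for n in nums[1:]' loop: state (ranges, start, end)
def pvLoopA : List Int → List String → Int → Int → List String × Int × Int
  | [], ranges, s, e => (ranges, s, e)
  | n :: rest, ranges, s, e =>
    if n = e + 1 then pvLoopA rest ranges s n
    else pvLoopA rest (ranges ++ [pvFmtA s e]) n n

def range_encode (nums : List Int) : Option String :=
  if nums = [] then none
  else
    match PySem.List.sorted nums (fun x => x) false with
    | [] => none  -- unreachable: sorted of a nonempty list is nonempty (nums[0] cannot raise)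
    | h :: t =>
      match pvLoopA t [] h h with
      | (ranges, s, e) => some (PySem.Str.join "," (ranges ++ [pvFmtA s e]))

-- ===== PORT B =====
-- Source B's _groups: split into maximal runs of constant key p.2 - p.1
def pvGroups : List (Int × Int) → List (List (Int × Int))
  | [] => []
  | p :: rest =>
    (p :: rest.takeWhile (fun q => q.2 - q.1 == p.2 - p.1)) ::
      pvGroups (rest.dropWhile (fun q => q.2 - q.1 == p.2 - p.1))
  termination_by l => l.length
  decreasing_by
    exact Nat.lt_succ_of_le (List.length_dropWhile_le _ _)

-- str(v[0]) if len(v) == 1 else f"{v[0]}-{v[-1]}"; v[0]/v[-1] on the nonempty group values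
def pvTokenB (g : List (Int × Int)) : String :=
  let v := g.map (·.2)
  if v.length = 1 then PySem.Int.toStr (v.headD 0)
  else PySem.Int.toStr (v.headD 0) ++ "-" ++ PySem.Int.toStr (v.getLastD 0)

def range_encode_alt (nums : List Int) : Option String :=
  if nums = [] then none
  else
    some (PySem.Str.join ","
      ((pvGroups (PySem.List.enumerate (PySem.List.sorted nums (fun x => x) false))).map pvTokenB))

-- ===== PRECONDITION & SPEC =====
def Spec_range_encode (nums : List Int) (out : Option String) : Prop := out = range_encode_alt nums
instance (nums : List Int) (out : Option String) : Decidable (Spec_range_encode nums out) := by unfold Spec_range_encode; infer_instance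

-- ===== CLAIM (what is proved, stated in full; the proofs are below) =====
def Claim_equal_range_encode : Prop := ∀ (nums : List Int), Dom_range_encode nums → Spec_range_encode nums (range_encode nums)

-- ===== LEMMAS AND PROOFS =====

-- proof-only: splits off the maximal consecutive run continuing value e:
-- returns (consumed values, end of run, remaining values)
def pvSplit : Int → List Int → List Int × Int × List Int
  | e, [] => ([], e, [])
  | e, n :: vs =>
    if n = e + 1 then
      match pvSplit n vs with
      | (c, e', r) => (n :: c, e', r)
    else ([], e, n :: vs)

-- proof-only: the token list A's scan produces from state (start, end) and remaining values
def pvTok : Int → Int → List Int → List String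
  | s, e, [] => [pvFmtA s e]
  | s, e, n :: vs => if n = e + 1 then pvTok s n vs else pvFmtA s e :: pvTok n n vs

theorem pvLoopA_tok : ∀ (t : List Int) (ranges : List String) (s e : Int),
    (match pvLoopA t ranges s e with
     | (r, s', e') => r ++ [pvFmtA s' e']) = ranges ++ pvTok s e t := by
  intro t
  induction t with
  | nil => intro ranges s e; simp [pvLoopA, pvTok]
  | cons n rest ih =>
    intro ranges s e
    by_cases h : n = e + 1
    · simp [pvLoopA, pvTok, h, ih]
    · simp [pvLoopA, pvTok, h, ih]

theorem pvTok_split : ∀ (vs : List Int) (s e : Int),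
    pvTok s e vs = pvFmtA s (pvSplit e vs).2.1 ::
      (match (pvSplit e vs).2.2 with
       | [] => []
       | n :: r' => pvTok n n r') := by
  intro vs
  induction vs with
  | nil => intro s e; simp [pvTok, pvSplit]
  | cons n vs ih =>
    intro s e
    by_cases h : n = e + 1
    · simp only [pvTok, pvSplit, if_pos h]
      rw [ih s n]
    · simp [pvTok, pvSplit, h]

theorem pvSplit_spec : ∀ (vs : List Int) (e i : Int),
    (PySem.List.enumerate vs (i + 1)).takeWhile (fun q => q.2 - q.1 == e - i)
        = PySem.List.enumerate (pvSplit e vs).1 (i + 1)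
    ∧ (PySem.List.enumerate vs (i + 1)).dropWhile (fun q => q.2 - q.1 == e - i)
        = PySem.List.enumerate (pvSplit e vs).2.2 (i + 1 + (pvSplit e vs).1.length)
    ∧ (pvSplit e vs).2.1 = e + (pvSplit e vs).1.length
    ∧ (e :: (pvSplit e vs).1).getLastD 0 = (pvSplit e vs).2.1
    ∧ (pvSplit e vs).2.2.length ≤ vs.length := by
  intro vs
  induction vs with
  | nil => intro e i; simp [pvSplit, PySem.List.enumerate_nil]
  | cons n vs ih =>
    intro e i
    by_cases h : n = e + 1
    · have hkey : n - (i + 1) = e - i := by omega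
      obtain ⟨h1, h2, h3, h4, h5⟩ := ih n (i + 1)
      rw [hkey] at h1 h2
      simp only [pvSplit, if_pos h]
      rcases hsp : pvSplit n vs with ⟨c, e', r⟩
      rw [hsp] at h1 h2 h3 h4 h5
      have hkt : ((n - (i + 1) == e - i) : Bool) = true := by
        simp only [beq_iff_eq]; omega
      refine ⟨?_, ?_, ?_, ?_, ?_⟩
      · rw [PySem.List.enumerate_cons, PySem.List.enumerate_cons]
        simp [hkt, h1]
      · rw [PySem.List.enumerate_cons]
        simp only [List.dropWhile_cons, hkt, if_true, h2]
        congr 1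
        simp
        omega
      · simp at h3 ⊢; omega
      · simpa using h4
      · simpa using Nat.le_succ_of_le h5
    · simp only [pvSplit, if_neg h]
      have hkf : ((n - (i + 1) == e - i) : Bool) = false := by
        simp only [beq_eq_false_iff_ne, ne_eq]; omega
      refine ⟨?_, ?_, by simp, by simp, by simp⟩
      · rw [PySem.List.enumerate_cons]
        simp [hkf, PySem.List.enumerate_nil]
      · rw [PySem.List.enumerate_cons]
        simp only [List.dropWhile_cons, hkf]
        rw [PySem.List.enumerate_cons]
        simp

theorem pvGroups_tok : ∀ (N : Nat) (vs : List Int), vs.length ≤ N → ∀ (v i : Int),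
    (pvGroups (PySem.List.enumerate (v :: vs) i)).map pvTokenB = pvTok v v vs := by
  intro N
  induction N with
  | zero =>
    intro vs hlen v i
    have hvs : vs = [] := by cases vs <;> simp_all
    subst hvs
    simp [PySem.List.enumerate_cons, PySem.List.enumerate_nil, pvGroups, pvTokenB, pvTok, pvFmtA]
  | succ N ih =>
    intro vs hlen v i
    obtain ⟨h1, h2, h3, h4, h5⟩ := pvSplit_spec vs v i
    rcases hsp : pvSplit v vs with ⟨c, e', r⟩
    rw [hsp] at h1 h2 h3 h4 h5
    simp only at h1 h2 h3 h4 h5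
    rw [PySem.List.enumerate_cons, pvGroups]
    simp only [h1, h2]
    rw [pvTok_split, hsp]
    simp only
    have hcval : c = [] ↔ v = e' := by
      constructor
      · intro hc; subst hc; simpa using h3.symm
      · intro hv
        cases c with
        | nil => rfl
        | cons a b => exfalso; simp at h3; omega
    have htokhead : pvTokenB ((i, v) :: PySem.List.enumerate c (i + 1)) = pvFmtA v e' := by
      unfold pvTokenB pvFmtA
      simp only [List.map_cons, PySem.List.map_snd_enumerate]
      by_cases hc : c = []
      · subst hc
        have hv : v = e' := hcval.mp rfl
        simp [hv]
      · have hv : ¬ v = e' := fun hv => hc (hcval.mpr hv)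
        have hlen1 : ¬ (v :: c).length = 1 := by cases c <;> simp_all
        rw [if_neg hv, if_neg (by simpa using hlen1)]
        have hlast : (v :: c).getLastD 0 = e' := by simpa using h4
        rw [hlast]
        simp
    simp only [List.map_cons, htokhead]
    congr 1
    cases r with
    | nil => simp [PySem.List.enumerate_nil, pvGroups]
    | cons n r' =>
      have hle : r'.length ≤ N := by simp at h5; omega
      exact ih r' hle n (i + 1 + (c.length : Int))

theorem sorted_ne_nil {nums : List Int} (h : nums ≠ []) :
    PySem.List.sorted nums (fun x => x) false ≠ [] := by
  intro hs
  have hp := PySem.List.sorted_perm nums (fun x => x) false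
  rw [hs] at hp
  exact h hp.symm.eq_nil

-- ===== VERDICT (by name: the statement is the Claim_ definition above) =====
theorem range_encode_spec : Claim_equal_range_encode := by
  intro nums _
  unfold Spec_range_encode range_encode range_encode_alt
  by_cases h : nums = []
  · simp [h]
  · rw [if_neg h, if_neg h]
    rcases hs : PySem.List.sorted nums (fun x => x) false with _ | ⟨v, t⟩
    · exact absurd hs (sorted_ne_nil h)
    · rcases hl : pvLoopA t [] v v with ⟨ranges, s, e⟩
      have hA : ranges ++ [pvFmtA s e] = pvTok v v t := by
        have := pvLoopA_tok t [] v v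
        rw [hl] at this
        simpa using this
      have hB := pvGroups_tok t.length t (le_refl _) v 0
      simp only [hl]
      rw [hA, ← hB]
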